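-- pv_equiv track=rewrite | github.com/FranckCHAMBON/ClasseVirtuelle | Term_NSI/devoirs/4-dm2/Corrigé/S7/E10.py | solitaire
-- ===== SOURCE A (Python) =====
-- def solitaire(grille:list) -> int:
--     """ Prend une grille qui décrit des positions d'un jeu de solitaire puis recherche et renvoie le nombre de coup possible
--     >>> solitaire([[2, 2, 0, 1, 1, 2, 2], [2, 2, 0, 0, 1, 2, 2], [0, 0, 1, 1, 0, 1, 0], [0, 1, 0, 0, 0, 0, 0], [0, 0, 1, 0, 1, 1, 0], [2, 2, 0, 0, 0, 2, 2], [2, 2, 0, 1, 1, 2, 2]])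
--     7
--     """
--     # Toutes les placements possibles d'une bille autour d'une autre
--     directions = [(1, 0),(0,1),(-1,0),(0,-1)]
--
--     def est_possible(x:int, y:int) -> bool:
--         """ Regarde si le déplacement est possible sur une grille 7*7
--         >>> est_possible(3, 7)
--         False
--         >>> est_possible(2, 4)
--         True
--         """
--         return (0 <= y < 7) and (0 <= x < 7)
--
--     def recherche_coup(x:int, y:int, direction_coup_y:int, direction_coup_x:int) -> int:
--         """ Recherche et renvoie 1 si il est possible de faire un coup sachant qu'il y a une bille à cotè sinon 0
--         """
--         y += direction_coup_y
--         x += direction_coup_x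
--         if not(est_possible(x, y)) or (grille[y][x] !=0):
--             return 0
--         return 1
--
--     nb_coups = 0
--     for y in range(7):
--         for x in range(7):
--             # Si on a une bille
--             if grille[y][x] == 1:
--                 for direction_y, direction_x in directions:
--                     # On regarde dans les 4 directions si il est possible de se déplacer et si il y a une bille
--                     déplacement_x = x+direction_x
--                     déplacement_y = y+direction_y
--                     if est_possible(déplacement_y,déplacement_x) and grille[déplacement_y][déplacement_x] == 1:
--                         # On regarde si le placement est possible après la bille qu'on saute
--                         direction_x *= 2
--                         direction_y *= 2
--                         nb_coups += recherche_coup(x, y, direction_y, direction_x)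
--
--     return nb_coups
-- ===== SOURCE B (Python) =====
-- def solitaire(grille: list) -> int:
--     """Count legal peg-solitaire moves by sliding a 3-cell window over the 7x7
--     board: a move is a consecutive triple (1,1,0) or (0,1,1) in a row, or in a
--     column (read off by zipping three consecutive rows)."""
--     PAT = ((1, 1, 0), (0, 1, 1))
--     rows = [[grille[y][x] for x in range(7)] for y in range(7)]
--     horiz = sum(1
--                 for row in rows
--                 for t in zip(row, row[1:], row[2:])
--                 if t in PAT)
--     vert = sum(1
--                for r0, r1, r2 in zip(rows, rows[1:], rows[2:])
--                for t in zip(r0, r1, r2)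
--                if t in PAT)
--     return horiz + vert
-- ===== Notes on version B (the rewrite author's own statement) =====
-- stated objective: alternative
-- what changed: B reads the 7x7 block once and recasts the move count as pattern matching: it counts consecutive 3-cell windows equal to (1,1,0) or (0,1,1) in each row and in each zipped triple of consecutive rows (columns), instead of A's per-peg probing in 4 directions with index arithmetic and bounds checks.
import Mathlib
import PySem

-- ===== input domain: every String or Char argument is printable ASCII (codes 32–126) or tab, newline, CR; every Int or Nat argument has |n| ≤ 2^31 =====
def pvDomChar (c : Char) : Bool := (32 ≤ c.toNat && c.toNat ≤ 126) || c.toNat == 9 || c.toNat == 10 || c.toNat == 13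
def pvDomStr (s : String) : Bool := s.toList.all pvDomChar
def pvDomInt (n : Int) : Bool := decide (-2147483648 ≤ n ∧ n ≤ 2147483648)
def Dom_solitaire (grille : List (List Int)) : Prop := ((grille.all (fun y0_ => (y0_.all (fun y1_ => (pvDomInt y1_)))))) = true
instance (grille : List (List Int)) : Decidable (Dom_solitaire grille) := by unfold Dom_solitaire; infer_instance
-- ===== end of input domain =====

-- B counts 3-cell window patterns (1,1,0)/(0,1,1) along rows and along zipped
-- consecutive-row triples (columns) instead of A's per-peg 4-direction probing;
-- objective: alternative (same cost on the fixed 7x7 board).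

-- ===== PORT A =====
-- grille[y][x]; under Pre_ every index A reads is in range, so the `.getD 0` default never fires.
def pvCellA (g : List (List Int)) (y x : Int) : Int :=
  ((PySem.List.pyGet? g y).bind (fun r => PySem.List.pyGet? r x)).getD 0

def estPossible (x y : Int) : Bool := decide (0 ≤ y ∧ y < 7) && decide (0 ≤ x ∧ x < 7)

def rechercheCoup (g : List (List Int)) (x y dcy dcx : Int) : Int :=
  let y2 := y + dcy
  let x2 := x + dcx
  if !(estPossible x2 y2) || !(pvCellA g y2 x2 == 0) then 0 else 1

def solitaire (grille : List (List Int)) : Int :=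
  (PySem.List.pyRange 0 7 1).foldl (fun nb y =>
    (PySem.List.pyRange 0 7 1).foldl (fun nb x =>
      if pvCellA grille y x == 1 then
        ([((1:Int),(0:Int)),(0,1),(-1,0),(0,-1)]).foldl (fun nb d =>
          if estPossible (y + d.1) (x + d.2) && (pvCellA grille (y + d.1) (x + d.2) == 1) then
            nb + rechercheCoup grille x y (2 * d.1) (2 * d.2)
          else nb) nb
      else nb) nb) 0

-- ===== PORT B =====
-- grille[y][x]; under Pre_ every index B reads is in range, so the `.getD 0` default never fires.
def pvCellB (g : List (List Int)) (y x : Int) : Int :=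
  ((PySem.List.pyGet? g y).bind (fun r => PySem.List.pyGet? r x)).getD 0

-- t in ((1,1,0),(0,1,1))
def pvPat (t : Int × Int × Int) : Bool := t == (1, 1, 0) || t == (0, 1, 1)

-- sum(1 for t in zip(line, line[1:], line[2:]) if t in PAT); row[1:]/[2:] are List.drop, zip is List.zip
def pvLineCount (line : List Int) : Int :=
  ((line.zip ((line.drop 1).zip (line.drop 2))).countP pvPat : Nat)

-- inner count of one (r0, r1, r2) triple of consecutive rows: column windows at each x
def pvTripleCount (r0 r1 r2 : List Int) : Int :=
  ((r0.zip (r1.zip r2)).countP pvPat : Nat)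

def solitaire_alt (grille : List (List Int)) : Int :=
  let rows := (PySem.List.pyRange 0 7 1).map (fun y =>
    (PySem.List.pyRange 0 7 1).map (fun x => pvCellB grille y x))
  let horiz := (rows.map pvLineCount).sum
  let vert := ((rows.zip ((rows.drop 1).zip (rows.drop 2))).map
      (fun t => pvTripleCount t.1 t.2.1 t.2.2)).sum
  horiz + vert

-- ===== PRECONDITION & SPEC =====
-- Pre_ excludes exactly the grids on which Python A raises IndexError: A unconditionally reads
-- grille[y][x] for all 0 ≤ y,x < 7, so it needs at least 7 rows whose first 7 each have ≥ 7 cells.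
def Pre_solitaire (grille : List (List Int)) : Prop :=
  7 ≤ grille.length ∧ ∀ row ∈ grille.take 7, 7 ≤ row.length
instance (grille : List (List Int)) : Decidable (Pre_solitaire grille) := by
  unfold Pre_solitaire; infer_instance

def pvWitness_solitaire : List (List Int) :=
  [[2, 2, 0, 1, 1, 2, 2], [2, 2, 0, 0, 1, 2, 2], [0, 0, 1, 1, 0, 1, 0],
   [0, 1, 0, 0, 0, 0, 0], [0, 0, 1, 0, 1, 1, 0], [2, 2, 0, 0, 0, 2, 2],
   [2, 2, 0, 1, 1, 2, 2]]

def Spec_solitaire (grille : List (List Int)) (out : Int) : Prop := out = solitaire_alt grille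
instance (grille : List (List Int)) (out : Int) : Decidable (Spec_solitaire grille out) := by
  unfold Spec_solitaire; infer_instance

-- ===== CLAIM (what is proved, stated in full; the proofs are below) =====
def Claim_equal_solitaire : Prop :=
  ∀ (grille : List (List Int)), Dom_solitaire grille → Pre_solitaire grille →
    Spec_solitaire grille (solitaire grille)

-- ===== LEMMAS AND PROOFS =====

def pvInb (i : Int) : Bool := decide (0 ≤ i ∧ i < 7)

-- the canonical indicator of one jump triple: source peg, jumped peg, empty landing cell
def pvT (g : List (List Int)) (y x dy dx : Int) : Int :=
  if (pvInb y && pvInb x && (pvCellA g y x == 1)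
      && pvInb (y + dy) && pvInb (x + dx) && (pvCellA g (y + dy) (x + dx) == 1)
      && pvInb (y + 2 * dy) && pvInb (x + 2 * dx) && (pvCellA g (y + 2 * dy) (x + 2 * dx) == 0))
  then 1 else 0

def pvR : List Int := [0, 1, 2, 3, 4, 5, 6]

-- window-pattern indicators
def I110 (a b c : Int) : Int := if a = 1 ∧ b = 1 ∧ c = 0 then 1 else 0
def I011 (a b c : Int) : Int := if a = 0 ∧ b = 1 ∧ c = 1 then 1 else 0

-- row y of the board as A reads it
def rowA (g : List (List Int)) (y : Int) : List Int :=
  [pvCellA g y 0, pvCellA g y 1, pvCellA g y 2, pvCellA g y 3,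
   pvCellA g y 4, pvCellA g y 5, pvCellA g y 6]

-- per-column window sums of one triple of rows (u, v, w)
def pvV110 (g : List (List Int)) (u v w : Int) : Int :=
  I110 (pvCellA g u 0) (pvCellA g v 0) (pvCellA g w 0)
  + I110 (pvCellA g u 1) (pvCellA g v 1) (pvCellA g w 1)
  + I110 (pvCellA g u 2) (pvCellA g v 2) (pvCellA g w 2)
  + I110 (pvCellA g u 3) (pvCellA g v 3) (pvCellA g w 3)
  + I110 (pvCellA g u 4) (pvCellA g v 4) (pvCellA g w 4)
  + I110 (pvCellA g u 5) (pvCellA g v 5) (pvCellA g w 5)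
  + I110 (pvCellA g u 6) (pvCellA g v 6) (pvCellA g w 6)

def pvV011 (g : List (List Int)) (u v w : Int) : Int :=
  I011 (pvCellA g u 0) (pvCellA g v 0) (pvCellA g w 0)
  + I011 (pvCellA g u 1) (pvCellA g v 1) (pvCellA g w 1)
  + I011 (pvCellA g u 2) (pvCellA g v 2) (pvCellA g w 2)
  + I011 (pvCellA g u 3) (pvCellA g v 3) (pvCellA g w 3)
  + I011 (pvCellA g u 4) (pvCellA g v 4) (pvCellA g w 4)
  + I011 (pvCellA g u 5) (pvCellA g v 5) (pvCellA g w 5)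
  + I011 (pvCellA g u 6) (pvCellA g v 6) (pvCellA g w 6)

lemma pvRange7 : PySem.List.pyRange 0 7 1 = pvR := by decide

lemma foldl_ite_add_sum {α : Type} (p : α → Bool) (f : α → Int) :
    ∀ (l : List α) (a : Int),
      l.foldl (fun acc t => if p t then acc + f t else acc) a
        = a + (l.map (fun t => if p t then f t else 0)).sum := by
  intro l
  induction l with
  | nil => intro a; simp
  | cons h t ih => intro a; by_cases hp : p h <;> simp [hp, ih] <;> try ring

lemma pvT_zero_cell (g : List (List Int)) (y x dy dx : Int)
    (h : ¬ pvCellA g y x = 1) : pvT g y x dy dx = 0 := by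
  unfold pvT
  rw [if_neg]
  simp only [pvInb, Bool.and_eq_true, decide_eq_true_eq, beq_iff_eq]
  tauto

-- A's inner direction term equals pvT, given the source peg and its bounds
lemma A_term (g : List (List Int)) (y x dy dx : Int)
    (hy : 0 ≤ y ∧ y < 7) (hx : 0 ≤ x ∧ x < 7) (hc : pvCellA g y x = 1) :
    (if estPossible (y + dy) (x + dx) && (pvCellA g (y + dy) (x + dx) == 1) then
        rechercheCoup g x y (2 * dy) (2 * dx)
      else 0) = pvT g y x dy dx := by
  unfold rechercheCoup pvT estPossible pvInb
  simp only [Bool.and_eq_true, Bool.or_eq_true, Bool.not_eq_true', decide_eq_true_eq,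
    beq_iff_eq, beq_eq_false_iff_ne, ne_eq, Bool.and_eq_false_iff, decide_eq_false_iff_not]
  split_ifs <;> omega

-- A as a triple sum of pvT
lemma LA (g : List (List Int)) :
    solitaire g
      = (pvR.map (fun y => (pvR.map (fun x =>
          (([((1:Int),(0:Int)),(0,1),(-1,0),(0,-1)]).map
            (fun d => pvT g y x d.1 d.2)).sum)).sum)).sum := by
  unfold solitaire
  rw [pvRange7]
  simp only [foldl_ite_add_sum, PySem.List.foldl_add, zero_add]
  apply congrArg List.sum
  apply List.map_congr_left
  intro y hy
  apply congrArg List.sum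
  apply List.map_congr_left
  intro x hx
  have hy' : 0 ≤ y ∧ y < 7 := by simp [pvR] at hy; omega
  have hx' : 0 ≤ x ∧ x < 7 := by simp [pvR] at hx; omega
  by_cases hc : pvCellA g y x = 1
  · rw [if_pos (by simpa using hc)]
    apply congrArg List.sum
    apply List.map_congr_left
    intro d _
    exact A_term g y x d.1 d.2 hy' hx' hc
  · rw [if_neg (by simpa using hc)]
    rw [List.map_congr_left (fun d _ => pvT_zero_cell g y x d.1 d.2 hc)]
    simp

-- pattern indicator split: one window matches exactly one of the two patterns
lemma patSplit (a b c : Int) :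
    (if pvPat (a, b, c) then (1 : Int) else 0) = I110 a b c + I011 a b c := by
  simp only [pvPat, I110, I011, Bool.or_eq_true, beq_iff_eq, Prod.mk.injEq]
  split_ifs <;> omega

lemma countP_pat (l : List (Int × Int × Int)) :
    ((l.countP pvPat : Nat) : Int)
      = (l.map (fun t => I110 t.1 t.2.1 t.2.2 + I011 t.1 t.2.1 t.2.2)).sum := by
  induction l with
  | nil => simp
  | cons h t ih =>
    obtain ⟨a, b, c⟩ := h
    rw [List.countP_cons]
    push_cast
    rw [ih]
    simp only [List.map_cons, List.sum_cons]
    rw [← patSplit]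
    by_cases hp : pvPat (a, b, c) <;> simp [hp] <;> ring

lemma pvLineCount7 (a0 a1 a2 a3 a4 a5 a6 : Int) :
    pvLineCount [a0, a1, a2, a3, a4, a5, a6]
      = (I110 a0 a1 a2 + I011 a0 a1 a2) + (I110 a1 a2 a3 + I011 a1 a2 a3)
        + (I110 a2 a3 a4 + I011 a2 a3 a4) + (I110 a3 a4 a5 + I011 a3 a4 a5)
        + (I110 a4 a5 a6 + I011 a4 a5 a6) := by
  unfold pvLineCount
  rw [countP_pat]
  simp only [List.drop, List.zip, List.zipWith, List.map_cons, List.map_nil,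
    List.sum_cons, List.sum_nil]
  ring

lemma pvTripleCount7 (a0 a1 a2 a3 a4 a5 a6 b0 b1 b2 b3 b4 b5 b6 c0 c1 c2 c3 c4 c5 c6 : Int) :
    pvTripleCount [a0, a1, a2, a3, a4, a5, a6] [b0, b1, b2, b3, b4, b5, b6]
        [c0, c1, c2, c3, c4, c5, c6]
      = (I110 a0 b0 c0 + I011 a0 b0 c0) + (I110 a1 b1 c1 + I011 a1 b1 c1)
        + (I110 a2 b2 c2 + I011 a2 b2 c2) + (I110 a3 b3 c3 + I011 a3 b3 c3)
        + (I110 a4 b4 c4 + I011 a4 b4 c4) + (I110 a5 b5 c5 + I011 a5 b5 c5)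
        + (I110 a6 b6 c6 + I011 a6 b6 c6) := by
  unfold pvTripleCount
  rw [countP_pat]
  simp only [List.zip, List.zipWith, List.map_cons, List.map_nil, List.sum_cons, List.sum_nil]
  ring

-- a triple-of-rows window count is its per-column I110 and I011 sums
lemma tripleSplit (g : List (List Int)) (u v w : Int) :
    pvTripleCount (rowA g u) (rowA g v) (rowA g w) = pvV110 g u v w + pvV011 g u v w := by
  unfold rowA pvV110 pvV011
  rw [pvTripleCount7]
  ring

-- pvT at concrete directions, in bounds / out of bounds
lemma pvT_h_in (g : List (List Int)) (y x : Int) (hy : 0 ≤ y ∧ y < 7) (hx : 0 ≤ x ∧ x + 2 < 7) :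
    pvT g y x 0 1 = I110 (pvCellA g y x) (pvCellA g y (x + 1)) (pvCellA g y (x + 2)) := by
  unfold pvT I110
  simp only [pvInb, mul_zero, add_zero, mul_one, Bool.and_eq_true, decide_eq_true_eq, beq_iff_eq]
  split_ifs <;> omega

lemma pvT_h_out (g : List (List Int)) (y x : Int) (hx : ¬ (0 ≤ x ∧ x + 2 < 7)) :
    pvT g y x 0 1 = 0 := by
  unfold pvT
  split_ifs with h
  · exfalso
    simp only [pvInb, mul_zero, add_zero, mul_one, Bool.and_eq_true, decide_eq_true_eq,
      beq_iff_eq] at h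
    omega
  · rfl

lemma pvT_hm_in (g : List (List Int)) (y x : Int) (hy : 0 ≤ y ∧ y < 7) (hx : 2 ≤ x ∧ x < 7) :
    pvT g y x 0 (-1)
      = I011 (pvCellA g y (x + 2 * (-1))) (pvCellA g y (x + (-1))) (pvCellA g y x) := by
  unfold pvT I011
  simp only [pvInb, mul_zero, add_zero, Bool.and_eq_true, decide_eq_true_eq, beq_iff_eq]
  split_ifs <;> omega

lemma pvT_hm_out (g : List (List Int)) (y x : Int) (hx : ¬ (2 ≤ x ∧ x < 7)) :
    pvT g y x 0 (-1) = 0 := by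
  unfold pvT
  split_ifs with h
  · exfalso
    simp only [pvInb, mul_zero, add_zero, Bool.and_eq_true, decide_eq_true_eq,
      beq_iff_eq] at h
    omega
  · rfl

lemma pvT_v_in (g : List (List Int)) (y x : Int) (hy : 0 ≤ y ∧ y + 2 < 7) (hx : 0 ≤ x ∧ x < 7) :
    pvT g y x 1 0 = I110 (pvCellA g y x) (pvCellA g (y + 1) x) (pvCellA g (y + 2) x) := by
  unfold pvT I110
  simp only [pvInb, mul_zero, add_zero, mul_one, Bool.and_eq_true, decide_eq_true_eq, beq_iff_eq]
  split_ifs <;> omega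

lemma pvT_v_out (g : List (List Int)) (y x : Int) (hy : ¬ (0 ≤ y ∧ y + 2 < 7)) :
    pvT g y x 1 0 = 0 := by
  unfold pvT
  split_ifs with h
  · exfalso
    simp only [pvInb, mul_zero, add_zero, mul_one, Bool.and_eq_true, decide_eq_true_eq,
      beq_iff_eq] at h
    omega
  · rfl

lemma pvT_vm_in (g : List (List Int)) (y x : Int) (hy : 2 ≤ y ∧ y < 7) (hx : 0 ≤ x ∧ x < 7) :
    pvT g y x (-1) 0
      = I011 (pvCellA g (y + 2 * (-1)) x) (pvCellA g (y + (-1)) x) (pvCellA g y x) := by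
  unfold pvT I011
  simp only [pvInb, mul_zero, add_zero, Bool.and_eq_true, decide_eq_true_eq, beq_iff_eq]
  split_ifs <;> omega

lemma pvT_vm_out (g : List (List Int)) (y x : Int) (hy : ¬ (2 ≤ y ∧ y < 7)) :
    pvT g y x (-1) 0 = 0 := by
  unfold pvT
  split_ifs with h
  · exfalso
    simp only [pvInb, mul_zero, add_zero, Bool.and_eq_true, decide_eq_true_eq,
      beq_iff_eq] at h
    omega
  · rfl

-- horizontal jumps out of row y are exactly the (1,1,0)/(0,1,1) windows of that row
lemma rowH (g : List (List Int)) (y : Int) (hy : 0 ≤ y ∧ y < 7) :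
    (pvR.map (fun x => pvT g y x 0 1 + pvT g y x 0 (-1))).sum = pvLineCount (rowA g y) := by
  unfold rowA
  rw [pvLineCount7]
  simp only [pvR, List.map_cons, List.map_nil, List.sum_cons, List.sum_nil]
  rw [pvT_h_in g y 0 hy (by omega), pvT_h_in g y 1 hy (by omega), pvT_h_in g y 2 hy (by omega),
    pvT_h_in g y 3 hy (by omega), pvT_h_in g y 4 hy (by omega),
    pvT_h_out g y 5 (by omega), pvT_h_out g y 6 (by omega),
    pvT_hm_out g y 0 (by omega), pvT_hm_out g y 1 (by omega),
    pvT_hm_in g y 2 hy (by omega), pvT_hm_in g y 3 hy (by omega),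
    pvT_hm_in g y 4 hy (by omega), pvT_hm_in g y 5 hy (by omega),
    pvT_hm_in g y 6 hy (by omega)]
  norm_num
  ring

-- downward jumps out of row y, as an if on y
lemma colVite (g : List (List Int)) (y : Int) :
    (pvR.map (fun x => pvT g y x 1 0)).sum
      = if 0 ≤ y ∧ y + 2 < 7 then pvV110 g y (y + 1) (y + 2) else 0 := by
  by_cases hy : 0 ≤ y ∧ y + 2 < 7
  · rw [if_pos hy]
    unfold pvV110
    simp only [pvR, List.map_cons, List.map_nil, List.sum_cons, List.sum_nil]
    rw [pvT_v_in g y 0 hy (by omega), pvT_v_in g y 1 hy (by omega), pvT_v_in g y 2 hy (by omega),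
      pvT_v_in g y 3 hy (by omega), pvT_v_in g y 4 hy (by omega), pvT_v_in g y 5 hy (by omega),
      pvT_v_in g y 6 hy (by omega)]
    ring
  · rw [if_neg hy]
    simp only [pvR, List.map_cons, List.map_nil, List.sum_cons, List.sum_nil]
    rw [pvT_v_out g y 0 hy, pvT_v_out g y 1 hy, pvT_v_out g y 2 hy, pvT_v_out g y 3 hy,
      pvT_v_out g y 4 hy, pvT_v_out g y 5 hy, pvT_v_out g y 6 hy]
    ring

-- upward jumps out of row y, as an if on y
lemma colVmite (g : List (List Int)) (y : Int) :
    (pvR.map (fun x => pvT g y x (-1) 0)).sum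
      = if 2 ≤ y ∧ y < 7 then pvV011 g (y + 2 * (-1)) (y + (-1)) y else 0 := by
  by_cases hy : 2 ≤ y ∧ y < 7
  · rw [if_pos hy]
    unfold pvV011
    simp only [pvR, List.map_cons, List.map_nil, List.sum_cons, List.sum_nil]
    rw [pvT_vm_in g y 0 hy (by omega), pvT_vm_in g y 1 hy (by omega), pvT_vm_in g y 2 hy (by omega),
      pvT_vm_in g y 3 hy (by omega), pvT_vm_in g y 4 hy (by omega), pvT_vm_in g y 5 hy (by omega),
      pvT_vm_in g y 6 hy (by omega)]
    ring
  · rw [if_neg hy]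
    simp only [pvR, List.map_cons, List.map_nil, List.sum_cons, List.sum_nil]
    rw [pvT_vm_out g y 0 hy, pvT_vm_out g y 1 hy, pvT_vm_out g y 2 hy, pvT_vm_out g y 3 hy,
      pvT_vm_out g y 4 hy, pvT_vm_out g y 5 hy, pvT_vm_out g y 6 hy]
    ring

-- A in window normal form: row windows plus the windows of each consecutive-row triple
lemma hA (g : List (List Int)) :
    solitaire g
      = (pvR.map (fun y => pvLineCount (rowA g y))).sum
        + (([0, 1, 2, 3, 4] : List Int).map
            (fun w => pvTripleCount (rowA g w) (rowA g (w + 1)) (rowA g (w + 2)))).sum := by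
  rw [LA]
  have step : ∀ y ∈ pvR,
      (pvR.map (fun x =>
        (([((1:Int),(0:Int)),(0,1),(-1,0),(0,-1)]).map (fun d => pvT g y x d.1 d.2)).sum)).sum
      = pvLineCount (rowA g y)
        + ((if 0 ≤ y ∧ y + 2 < 7 then pvV110 g y (y + 1) (y + 2) else 0)
            + (if 2 ≤ y ∧ y < 7 then pvV011 g (y + 2 * (-1)) (y + (-1)) y else 0)) := by
    intro y hy
    have hy' : 0 ≤ y ∧ y < 7 := by simp [pvR] at hy; omega
    rw [← rowH g y hy', ← colVite g y, ← colVmite g y]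
    simp only [pvR, List.map_cons, List.map_nil, List.sum_cons, List.sum_nil]
    ring
  rw [List.map_congr_left step]
  simp only [pvR, List.map_cons, List.map_nil, List.sum_cons, List.sum_nil]
  norm_num
  rw [tripleSplit g 0 1 2, tripleSplit g 1 2 3, tripleSplit g 2 3 4, tripleSplit g 3 4 5,
    tripleSplit g 4 5 6]
  ring

theorem solitaire_eq (g : List (List Int)) : solitaire g = solitaire_alt g := by
  have hcb : pvCellB = pvCellA := rfl
  rw [hA]
  simp only [solitaire_alt, pvRange7, pvR, rowA, hcb, List.map_cons, List.map_nil,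
    List.sum_cons, List.sum_nil, List.drop_succ_cons, List.drop_zero,
    List.zip_cons_cons, List.zip_nil_right]
  norm_num

-- ===== VERDICT (by name: the statement is the Claim_ definition above) =====
theorem solitaire_spec : Claim_equal_solitaire := by
  intro g _ _
  unfold Spec_solitaire
  exact solitaire_eq g
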